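-- pv_equiv track=rewrite | github.com/Multu/vps | level0/lesson25/main.py | transform
-- ===== SOURCE A (Python) =====
-- def max_value_in_range(value_list, from_pos, to_pos):
--     max_value = value_list[from_pos]
--
--     for i in range(to_pos + 1):
--         if value_list[i] > max_value:
--             max_value = value_list[i]
--
--     return max_value
--
-- def transform(a):
--     b = []
--
--     for i in range(len(a)):
--         for j in range(len(a) - i):
--             k = i + j
--             max_value = max_value_in_range(a, j, k)
--             b.append(max_value)
--
--     return b
-- ===== SOURCE B (Python) =====
-- def transform(a):
--     # prefix[k] = max(a[0..k]); A's inner scan only ever yields this value,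
--     # so the answer is the concatenation of prefix[i:] for each i.
--     prefix = []
--     m = None
--     for x in a:
--         if m is None or x > m:
--             m = x
--         prefix.append(m)
--     b = []
--     for i in range(len(a)):
--         b.extend(prefix[i:])
--     return b
-- ===== Notes on version B (the rewrite author's own statement) =====
-- stated objective: faster
-- what changed: A recomputes each range maximum by scanning from index 0 for every pair (i,j), O(n^3); B notes that scan always yields the prefix maximum up to k=i+j, so it builds the prefix-maximum array in one pass and outputs its suffixes, O(n^2).
import Mathlib
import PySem

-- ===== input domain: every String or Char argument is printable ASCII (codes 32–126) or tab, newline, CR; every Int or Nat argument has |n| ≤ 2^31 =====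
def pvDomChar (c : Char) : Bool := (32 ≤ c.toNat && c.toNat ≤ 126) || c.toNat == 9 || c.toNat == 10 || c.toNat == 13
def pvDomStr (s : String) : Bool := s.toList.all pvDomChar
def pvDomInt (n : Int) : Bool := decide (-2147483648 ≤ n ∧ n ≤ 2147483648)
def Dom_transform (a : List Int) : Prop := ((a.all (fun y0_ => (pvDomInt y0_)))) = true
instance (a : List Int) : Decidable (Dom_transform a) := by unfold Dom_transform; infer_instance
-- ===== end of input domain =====

-- B replaces A's per-pair O(n) rescans with one precomputed prefix-maximum array whose
-- suffixes form the answer: an asymptotically faster (O(n^2) vs O(n^3)) exact re-implementation.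


-- ===== PORT A =====
-- max_value_in_range(value_list, from_pos, to_pos); every call site passes in-range
-- nonnegative indices, so pyGetD with default 0 is exact (the default is never used).
def maxValueInRange (valueList : List Int) (fromPos toPos : Int) : Int :=
  (PySem.List.pyRange 0 (toPos + 1) 1).foldl
    (fun m i => if PySem.List.pyGetD valueList i 0 > m then PySem.List.pyGetD valueList i 0 else m)
    (PySem.List.pyGetD valueList fromPos 0)

def transform (a : List Int) : List Int :=
  (PySem.List.pyRange 0 (a.length : Int) 1).foldl
    (fun b i =>
      (PySem.List.pyRange 0 ((a.length : Int) - i) 1).foldl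
        (fun b j => b ++ [maxValueInRange a j (i + j)]) b)
    []

-- ===== PORT B =====
def transform_alt (a : List Int) : List Int :=
  -- running prefix-maximum pass: state = (prefix list so far, current max m or None)
  let st := a.foldl
    (fun (st : List Int × Option Int) x =>
      match st.2 with
      | none => (st.1 ++ [x], some x)
      | some m => let m' := if x > m then x else m; (st.1 ++ [m'], some m'))
    ([], none)
  let pfx := st.1
  (PySem.List.pyRange 0 (a.length : Int) 1).foldl
    (fun b i => b ++ PySem.List.slice pfx (some i) none) []

-- ===== PRECONDITION & SPEC =====
def Spec_transform (a : List Int) (out : List Int) : Prop := out = transform_alt a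
instance (a : List Int) (out : List Int) : Decidable (Spec_transform a out) := by unfold Spec_transform; infer_instance

-- ===== CLAIM (what is proved, stated in full; the proofs are below) =====
def Claim_equal_transform : Prop := ∀ (a : List Int), Dom_transform a → Spec_transform a (transform a)

-- ===== LEMMAS AND PROOFS =====

-- prefix-maximum list starting from running max m
def pl (m : Int) : List Int → List Int
  | [] => []
  | x :: xs => (max m x) :: pl (max m x) xs

def prefList : List Int → List Int
  | [] => []
  | x :: xs => x :: pl x xs

theorem length_pl (m : Int) (xs : List Int) : (pl m xs).length = xs.length := by
  induction xs generalizing m with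
  | nil => rfl
  | cons x xs ih => simp [pl, ih]

theorem length_prefList (a : List Int) : (prefList a).length = a.length := by
  cases a with
  | nil => rfl
  | cons x xs => simp [prefList, length_pl]

theorem foldl_max_smul (xs : List Int) (a b : Int) :
    xs.foldl max (max a b) = max a (xs.foldl max b) := by
  induction xs generalizing a b with
  | nil => rfl
  | cons x xs ih =>
    simp only [List.foldl_cons]
    rw [max_assoc, ih]

theorem le_foldl_max_of_mem {y : Int} {xs : List Int} (h : y ∈ xs) (m : Int) :
    y ≤ xs.foldl max m := by
  induction xs generalizing m with
  | nil => cases h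
  | cons x xs ih =>
    simp only [List.foldl_cons]
    rcases List.mem_cons.mp h with rfl | h
    · calc y ≤ max m y := le_max_right _ _
        _ ≤ xs.foldl max (max m y) := (PySem.List.le_foldl_max xs (max m y)).1
    · exact ih h _

theorem foldl_max_mem_eq {y z : Int} {xs : List Int} (hy : y ∈ xs) (hz : z ∈ xs) :
    xs.foldl max y = xs.foldl max z := by
  have h1 : xs.foldl max (max y z) = max y (xs.foldl max z) := foldl_max_smul xs y z
  have h2 : xs.foldl max (max z y) = max z (xs.foldl max y) := foldl_max_smul xs z y
  rw [max_comm z y] at h2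
  have e1 : max y (xs.foldl max z) = xs.foldl max z :=
    max_eq_right (le_foldl_max_of_mem hy z)
  have e2 : max z (xs.foldl max y) = xs.foldl max y :=
    max_eq_right (le_foldl_max_of_mem hz y)
  rw [h1, e1] at h2; rw [e2] at h2; exact h2.symm

theorem pl_getElem (xs : List Int) (m : Int) (k : Nat) (hk : k < xs.length) :
    (pl m xs)[k]'(by rw [length_pl]; exact hk) = (xs.take (k + 1)).foldl max m := by
  induction xs generalizing m k with
  | nil => cases hk
  | cons y ys ih =>
    cases k with
    | zero => simp [pl]
    | succ k =>
      have hk' : k < ys.length := by simpa using hk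
      simp only [pl, List.getElem_cons_succ, List.take_succ_cons, List.foldl_cons]
      exact ih (max m y) k hk'

theorem prefList_getElem (a : List Int) (k : Nat) (hk : k < a.length) :
    (prefList a)[k]'(by rw [length_prefList]; exact hk) =
      (a.take (k + 1)).foldl max (a[0]'(by omega)) := by
  cases a with
  | nil => cases hk
  | cons x xs =>
    cases k with
    | zero => simp [prefList]
    | succ k =>
      have hk' : k < xs.length := by simpa using hk
      simp only [prefList, List.getElem_cons_succ, List.getElem_cons_zero,
        List.take_succ_cons, List.foldl_cons, max_self]
      exact pl_getElem xs x k hk'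

-- the if-form in both programs is max on Int
theorem fmax_eq (m x : Int) : (if x > m then x else m) = max m x := by omega

-- the index loop of A's helper, over any list, is a fold of max over that list
theorem fold_if_pyRange (xs : List Int) (init : Int) :
    (PySem.List.pyRange 0 ((xs.length : Nat) : Int) 1).foldl
      (fun m i => if PySem.List.pyGetD xs i 0 > m then PySem.List.pyGetD xs i 0 else m) init
    = xs.foldl max init := by
  have h1 := PySem.List.foldl_pyRange_zero_pyGetD xs 0 (fun m v => if v > m then v else m) init
  exact h1.trans (PySem.List.foldl_congr_mem _ _ _ _ (fun acc x _ => fmax_eq acc x))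

theorem mem_take_of_le (a : List Int) (j k : Nat) (hjk : j ≤ k) (hk : k < a.length) :
    a[j]'(by omega) ∈ a.take (k + 1) := by
  have hl : j < (a.take (k + 1)).length := by simp [List.length_take]; omega
  have := List.getElem_mem hl
  simpa using this

-- A's helper computes the prefix maximum up to k (for in-range j ≤ k)
theorem maxValueInRange_eq (a : List Int) (j k : Nat) (hjk : j ≤ k) (hk : k < a.length) :
    maxValueInRange a (j : Int) (k : Int) =
      (prefList a)[k]'(by rw [length_prefList]; exact hk) := by
  unfold maxValueInRange
  have hcast : (k : Int) + 1 = ((k + 1 : Nat) : Int) := by omega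
  have hlen : (a.take (k + 1)).length = k + 1 := by rw [List.length_take]; omega
  have hcongr :
      (PySem.List.pyRange 0 ((k : Int) + 1) 1).foldl
        (fun m i => if PySem.List.pyGetD a i 0 > m then PySem.List.pyGetD a i 0 else m)
        (PySem.List.pyGetD a (j : Int) 0)
      = (PySem.List.pyRange 0 ((k : Int) + 1) 1).foldl
        (fun m i => if PySem.List.pyGetD (a.take (k + 1)) i 0 > m then PySem.List.pyGetD (a.take (k + 1)) i 0 else m)
        (PySem.List.pyGetD a (j : Int) 0) := by
    apply PySem.List.foldl_congr_mem
    intro acc x hx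
    have hb := (PySem.List.mem_pyRange_one).mp hx
    have hxeq : PySem.List.pyGetD a x 0 = PySem.List.pyGetD (a.take (k + 1)) x 0 := by
      have h0 : x = ((x.toNat : Nat) : Int) := by omega
      have hxk : x.toNat < k + 1 := by omega
      rw [h0, PySem.List.pyGetD_natCast, PySem.List.pyGetD_natCast,
        List.getD_eq_getElem?_getD, List.getD_eq_getElem?_getD,
        List.getElem?_take_of_lt hxk]
    rw [hxeq]
  have hlen' : ((k + 1 : Nat) : Int) = (((a.take (k + 1)).length : Nat) : Int) := by rw [hlen]
  rw [hcongr, hcast, hlen', fold_if_pyRange]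
  have hj : PySem.List.pyGetD a (j : Int) 0 = a[j]'(by omega) := by
    rw [PySem.List.pyGetD_natCast, List.getD_eq_getElem?_getD,
      List.getElem?_eq_getElem (by omega)]
    rfl
  rw [hj, prefList_getElem a k hk]
  exact foldl_max_mem_eq (mem_take_of_le a j k hjk hk) (mem_take_of_le a 0 k (by omega) hk)

-- B's first pass builds exactly prefList
theorem foldB_some (xs : List Int) (acc : List Int) (m : Int) :
    xs.foldl
      (fun (st : List Int × Option Int) x =>
        match st.2 with
        | none => (st.1 ++ [x], some x)
        | some m => let m' := if x > m then x else m; (st.1 ++ [m'], some m'))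
      (acc, some m)
    = (acc ++ pl m xs, some (xs.foldl max m)) := by
  induction xs generalizing acc m with
  | nil => simp [pl]
  | cons x xs ih =>
    simp only [List.foldl_cons, pl]
    rw [fmax_eq, ih]
    simp

theorem foldB (a : List Int) :
    (a.foldl
      (fun (st : List Int × Option Int) x =>
        match st.2 with
        | none => (st.1 ++ [x], some x)
        | some m => let m' := if x > m then x else m; (st.1 ++ [m'], some m'))
      ([], none)).1 = prefList a := by
  cases a with
  | nil => rfl
  | cons x xs =>
    simp only [List.foldl_cons]
    rw [show (([] : List Int) ++ [x], some x) = ([x], some x) by simp, foldB_some]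
    simp [prefList]

-- per-i row equality: A's inner row equals the i-th suffix of the prefix-max list
theorem row_eq (a : List Int) (t : Nat) (ht : t ≤ a.length) :
    (PySem.List.pyRange 0 ((a.length : Int) - (t : Int)) 1).map
        (fun j => maxValueInRange a j ((t : Int) + j))
      = (prefList a).drop t := by
  apply List.ext_getElem
  · simp [PySem.List.length_pyRange_one, length_prefList]
  · intro s h1 h2
    have hs : s < a.length - t := by
      simp only [List.length_map, PySem.List.length_pyRange_one] at h1
      omega
    rw [List.getElem_map, PySem.List.getElem_pyRange_one]
    have hidx : (0 : Int) + (s : Int) = ((s : Nat) : Int) := by omega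
    have hsum : (t : Int) + (s : Int) = (((t + s : Nat)) : Int) := by omega
    rw [hidx, hsum, maxValueInRange_eq a s (t + s) (by omega) (by omega),
      List.getElem_drop]

theorem transform_eq_flat (a : List Int) :
    transform a = (PySem.List.pyRange 0 (a.length : Int) 1).flatMap
      (fun i => (PySem.List.pyRange 0 ((a.length : Int) - i) 1).map
        (fun j => maxValueInRange a j (i + j))) := by
  unfold transform
  have h : ∀ (l : List Int) (init : List Int),
      l.foldl (fun b i =>
        (PySem.List.pyRange 0 ((a.length : Int) - i) 1).foldl
          (fun b j => b ++ [maxValueInRange a j (i + j)]) b) init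
      = init ++ l.flatMap (fun i => (PySem.List.pyRange 0 ((a.length : Int) - i) 1).map
          (fun j => maxValueInRange a j (i + j))) := by
    intro l
    induction l with
    | nil => intro init; simp
    | cons x xs ih =>
      intro init
      simp only [List.foldl_cons, List.flatMap_cons]
      rw [PySem.List.foldl_append_singleton_eq_map, ih]
      simp
  rw [h]; rfl

theorem transform_alt_eq_flat (a : List Int) :
    transform_alt a = (PySem.List.pyRange 0 (a.length : Int) 1).flatMap
      (fun i => PySem.List.slice (prefList a) (some i) none) := by
  unfold transform_alt
  simp only [foldB]
  rw [PySem.List.foldl_append_eq_flatMap]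
  rfl

-- ===== VERDICT (by name: the statement is the Claim_ definition above) =====
theorem transform_spec : Claim_equal_transform := by
  intro a _
  unfold Spec_transform
  rw [transform_eq_flat, transform_alt_eq_flat]
  apply List.flatMap_congr
  intro i hi
  have hb := (PySem.List.mem_pyRange_one).mp hi
  rw [PySem.List.slice_from _ (by omega)]
  have ht : i = ((i.toNat : Nat) : Int) := by omega
  rw [ht]
  exact row_eq a i.toNat (by omega)
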